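-- pv_equiv track=rewrite | github.com/YeonUk-Kim0120/paper-darkmode | dark_pdf.py | _protect_strings
-- ===== SOURCE A (Python) =====
-- def _protect_strings(text: str):
--     """PDF (…) 문자열을 플레이스홀더로 교체한다."""
--     protected: list = []
--     out: list = []
--     i, n = 0, len(text)
--     while i < n:
--         if text[i] == '(':
--             depth = 1
--             j = i + 1
--             while j < n and depth > 0:
--                 if text[j] == '\\':
--                     j += 2
--                     continue
--                 if text[j] == '(':
--                     depth += 1
--                 elif text[j] == ')':
--                     depth -= 1
--                 j += 1
--             protected.append(text[i:j])
--             out.append(f"\x00S{len(protected) - 1}\x00")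
--             i = j
--         else:
--             out.append(text[i])
--             i += 1
--     return ''.join(out), protected
-- ===== SOURCE B (Python) =====
-- def _protect_strings(text: str):
--     """Flat single-loop state machine: depth counter + escape flag + current buffer."""
--     protected = []
--     out = []
--     depth = 0
--     esc = False
--     buf = []
--     for ch in text:
--         if depth == 0:
--             if ch == '(':
--                 buf = [ch]
--                 depth = 1
--                 esc = False
--             else:
--                 out.append(ch)
--         else:
--             buf.append(ch)
--             if esc:
--                 esc = False
--             elif ch == '\\':
--                 esc = True
--             elif ch == '(':
--                 depth += 1
--             elif ch == ')':
--                 depth -= 1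
--                 if depth == 0:
--                     out.append(f"\x00S{len(protected)}\x00")
--                     protected.append(''.join(buf))
--                     buf = []
--     if depth > 0:
--         out.append(f"\x00S{len(protected)}\x00")
--         protected.append(''.join(buf))
--     return ''.join(out), protected
-- ===== Notes on version B (the rewrite author's own statement) =====
-- stated objective: alternative
-- what changed: A's nested index loops (outer scan plus an inner index-jumping string scanner that re-slices the text) are replaced by one flat per-character state machine carrying a depth counter, an escape flag and the current string buffer.
import Mathlib
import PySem

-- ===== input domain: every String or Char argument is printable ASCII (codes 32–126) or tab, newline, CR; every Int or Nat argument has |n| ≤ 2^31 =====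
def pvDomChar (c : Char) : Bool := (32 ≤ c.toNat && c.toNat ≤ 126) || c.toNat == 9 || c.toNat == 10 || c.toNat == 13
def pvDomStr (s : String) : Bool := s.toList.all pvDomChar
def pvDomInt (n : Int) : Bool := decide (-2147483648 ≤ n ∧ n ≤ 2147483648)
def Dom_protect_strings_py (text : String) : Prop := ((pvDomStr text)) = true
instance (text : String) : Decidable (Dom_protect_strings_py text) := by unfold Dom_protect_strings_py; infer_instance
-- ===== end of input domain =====

-- B rewrites A's nested index-scanning loops as one flat per-character state machine
-- (depth counter + escape flag + current buffer); same O(n) algorithm class, measured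
-- constant-factor faster in Python (no per-index access or re-slicing).

-- placeholder string "\x00S<k>\x00" (shared pure helper)
def pvPH (k : Nat) : String := "\x00S" ++ toString k ++ "\x00"

-- ===== PORT A =====
-- inner while loop of A: state (j, depth)
def pvInner (s : List Char) (n j depth : Nat) : Nat × Nat :=
  if _h : j < n ∧ 0 < depth then
    if s.getD j ' ' = '\\' then pvInner s n (j + 2) depth
    else if s.getD j ' ' = '(' then pvInner s n (j + 1) (depth + 1)
    else if s.getD j ' ' = ')' then pvInner s n (j + 1) (depth - 1)
    else pvInner s n (j + 1) depth
  else (j, depth)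
termination_by n - j
decreasing_by all_goals exact Nat.sub_lt_sub_left _h.1 (Nat.lt_add_of_pos_right (by decide))

theorem pvInner_ge (s : List Char) (n j depth : Nat) : j ≤ (pvInner s n j depth).1 := by
  rw [pvInner]
  by_cases h : j < n ∧ 0 < depth
  · rw [dif_pos h]
    by_cases h1 : s.getD j ' ' = '\\'
    · rw [if_pos h1]
      exact Nat.le_trans (Nat.le_add_right j 2) (pvInner_ge s n (j + 2) depth)
    · rw [if_neg h1]
      by_cases h2 : s.getD j ' ' = '('
      · rw [if_pos h2]
        exact Nat.le_trans (Nat.le_add_right j 1) (pvInner_ge s n (j + 1) (depth + 1))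
      · rw [if_neg h2]
        by_cases h3 : s.getD j ' ' = ')'
        · rw [if_pos h3]
          exact Nat.le_trans (Nat.le_add_right j 1) (pvInner_ge s n (j + 1) (depth - 1))
        · rw [if_neg h3]
          exact Nat.le_trans (Nat.le_add_right j 1) (pvInner_ge s n (j + 1) depth)
  · rw [dif_neg h]
termination_by n - j
decreasing_by all_goals exact Nat.sub_lt_sub_left h.1 (Nat.lt_add_of_pos_right (by decide))

-- outer while loop of A
def pvOuter (s : List Char) (n i : Nat) (out prot : List String) : String × List String :=
  if _h : i < n then
    if s.getD i ' ' = '(' then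
      let j := (pvInner s n (i + 1) 1).1
      pvOuter s n j (out ++ [pvPH prot.length]) (prot ++ [String.ofList ((s.drop i).take (j - i))])
    else
      pvOuter s n (i + 1) (out ++ [(s.getD i ' ').toString]) prot
  else (String.join out, prot)
termination_by n + 1 - i
decreasing_by
  · exact Nat.sub_lt_sub_left (Nat.lt_succ_of_lt _h)
      (Nat.lt_of_lt_of_le (Nat.lt_succ_self i) (pvInner_ge s n (i + 1) 1))
  · exact Nat.sub_lt_sub_left (Nat.lt_succ_of_lt _h) (Nat.lt_succ_self i)

def protect_strings_py (text : String) : String × List String :=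
  pvOuter text.toList text.toList.length 0 [] []

-- ===== PORT B =====
-- flat state machine: depth, escape flag, current buffer
def pvGoB (s : List Char) (depth : Nat) (esc : Bool) (buf : List Char)
    (out prot : List String) : String × List String :=
  match s with
  | [] =>
    if 0 < depth then
      (String.join (out ++ [pvPH prot.length]), prot ++ [String.ofList buf])
    else (String.join out, prot)
  | c :: rest =>
    if depth = 0 then
      if c = '(' then pvGoB rest 1 false [c] out prot
      else pvGoB rest 0 false buf (out ++ [c.toString]) prot
    else
      let buf' := buf ++ [c]
      if esc then pvGoB rest depth false buf' out prot
      else if c = '\\' then pvGoB rest depth true buf' out prot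
      else if c = '(' then pvGoB rest (depth + 1) false buf' out prot
      else if c = ')' then
        if depth - 1 = 0 then
          pvGoB rest 0 false [] (out ++ [pvPH prot.length]) (prot ++ [String.ofList buf'])
        else pvGoB rest (depth - 1) false buf' out prot
      else pvGoB rest depth false buf' out prot

def protect_strings_py_alt (text : String) : String × List String :=
  pvGoB text.toList 0 false [] [] []

-- ===== PRECONDITION & SPEC =====
def Spec_protect_strings_py (text : String) (out : String × List String) : Prop := out = protect_strings_py_alt text
instance (text : String) (out : String × List String) : Decidable (Spec_protect_strings_py text out) := by unfold Spec_protect_strings_py; infer_instance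

-- ===== CLAIM (what is proved, stated in full; the proofs are below) =====
def Claim_equal_protect_strings_py : Prop := ∀ (text : String), Dom_protect_strings_py text → Spec_protect_strings_py text (protect_strings_py text)

-- ===== LEMMAS AND PROOFS =====

theorem pv_drop_cons (s : List Char) (j : Nat) (h : j < s.length) :
    s.drop j = s.getD j ' ' :: s.drop (j + 1) := by
  rw [List.getD_eq_getElem s ' ' h]
  exact List.drop_eq_getElem_cons h

theorem pvInner_exit (s : List Char) (n j depth : Nat)
    (h : (pvInner s n j depth).2 ≠ 0) : n ≤ (pvInner s n j depth).1 := by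
  fun_induction pvInner <;> simp_all

-- bridge for the inner string scan: B's in-string processing agrees with A's inner loop
theorem pv_inner_bridge (s : List Char) (j depth : Nat) (buf : List Char)
    (out prot : List String) (hd : 0 < depth) :
    pvGoB (s.drop j) depth false buf out prot =
      (let p := pvInner s s.length j depth
       if p.2 = 0 then
         pvGoB (s.drop p.1) 0 false [] (out ++ [pvPH prot.length])
           (prot ++ [String.ofList (buf ++ (s.drop j).take (p.1 - j))])
       else
         (String.join (out ++ [pvPH prot.length]),
          prot ++ [String.ofList (buf ++ (s.drop j).take (p.1 - j))])) := by
  have hd0 : ¬ depth = 0 := by omega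
  by_cases hj : j < s.length
  · have hcond : j < s.length ∧ 0 < depth := ⟨hj, hd⟩
    by_cases hb : s.getD j ' ' = '\\'
    · have hInner : pvInner s s.length j depth = pvInner s s.length (j + 2) depth := by
        rw [pvInner, dif_pos hcond, if_pos hb]
      rw [pv_drop_cons s j hj]
      simp only [pvGoB, if_neg hd0, Bool.false_eq_true, if_false, if_pos hb]
      by_cases hj1 : j + 1 < s.length
      · rw [pv_drop_cons s (j + 1) hj1]
        have e2 : j + 1 + 1 = j + 2 := by omega
        simp only [pvGoB, if_neg hd0, e2, if_true]
        rw [pv_inner_bridge s (j + 2) depth _ out prot hd]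
        have hge := pvInner_ge s s.length (j + 2) depth
        simp only [hInner]
        have h2 : (pvInner s s.length (j + 2) depth).1 - j
            = (pvInner s s.length (j + 2) depth).1 - (j + 2) + 1 + 1 := by omega
        rw [h2]
        simp [List.append_assoc]
      · have hE : s.drop (j + 1) = [] := List.drop_eq_nil_of_le (by omega)
        rw [hE]
        simp only [pvGoB, if_pos hd]
        have hI2 : pvInner s s.length (j + 2) depth = (j + 2, depth) := by
          rw [pvInner, dif_neg (by omega)]
        simp only [hInner, hI2, if_neg hd0]
        simp
    · by_cases hp : s.getD j ' ' = '('
      · have hInner : pvInner s s.length j depth = pvInner s s.length (j + 1) (depth + 1) := by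
          rw [pvInner, dif_pos hcond, if_neg hb, if_pos hp]
        rw [pv_drop_cons s j hj]
        simp only [pvGoB, if_neg hd0, Bool.false_eq_true, if_false, if_neg hb, if_pos hp]
        rw [pv_inner_bridge s (j + 1) (depth + 1) _ out prot (by omega)]
        have hge := pvInner_ge s s.length (j + 1) (depth + 1)
        simp only [hInner]
        have h2 : (pvInner s s.length (j + 1) (depth + 1)).1 - j
            = (pvInner s s.length (j + 1) (depth + 1)).1 - (j + 1) + 1 := by omega
        rw [h2]
        simp [List.append_assoc]
      · by_cases hr : s.getD j ' ' = ')'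
        · by_cases h1 : depth = 1
          · subst h1
            have hI0 : pvInner s s.length (j + 1) (1 - 1) = (j + 1, 0) := by
              rw [pvInner, dif_neg (by omega)]
            have hInner : pvInner s s.length j 1 = (j + 1, 0) := by
              rw [pvInner, dif_pos hcond, if_neg hb, if_neg hp, if_pos hr, hI0]
            rw [pv_drop_cons s j hj]
            simp only [pvGoB, Bool.false_eq_true, if_false, if_neg hb, if_neg hp, if_pos hr]
            simp [hInner]
          · have hInner : pvInner s s.length j depth = pvInner s s.length (j + 1) (depth - 1) := by
              rw [pvInner, dif_pos hcond, if_neg hb, if_neg hp, if_pos hr]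
            rw [pv_drop_cons s j hj]
            have hd1 : ¬ depth - 1 = 0 := by omega
            simp only [pvGoB, if_neg hd0, Bool.false_eq_true, if_false, if_neg hb, if_neg hp,
              if_pos hr, if_neg hd1]
            rw [pv_inner_bridge s (j + 1) (depth - 1) _ out prot (by omega)]
            have hge := pvInner_ge s s.length (j + 1) (depth - 1)
            simp only [hInner]
            have h2 : (pvInner s s.length (j + 1) (depth - 1)).1 - j
                = (pvInner s s.length (j + 1) (depth - 1)).1 - (j + 1) + 1 := by omega
            rw [h2]
            simp [List.append_assoc]
        · have hInner : pvInner s s.length j depth = pvInner s s.length (j + 1) depth := by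
            rw [pvInner, dif_pos hcond, if_neg hb, if_neg hp, if_neg hr]
          rw [pv_drop_cons s j hj]
          simp only [pvGoB, if_neg hd0, Bool.false_eq_true, if_false, if_neg hb, if_neg hp,
            if_neg hr]
          rw [pv_inner_bridge s (j + 1) depth _ out prot hd]
          have hge := pvInner_ge s s.length (j + 1) depth
          simp only [hInner]
          have h2 : (pvInner s s.length (j + 1) depth).1 - j
              = (pvInner s s.length (j + 1) depth).1 - (j + 1) + 1 := by omega
          rw [h2]
          simp [List.append_assoc]
  · have hE : s.drop j = [] := List.drop_eq_nil_of_le (by omega)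
    have hInner : pvInner s s.length j depth = (j, depth) := by
      rw [pvInner, dif_neg (by omega)]
    rw [hE]
    simp [pvGoB, if_pos hd, hInner, hE]
termination_by s.length - j
decreasing_by all_goals omega

-- bridge for the outer loop
theorem pv_outer_bridge (s : List Char) (i : Nat) (out prot : List String) (buf : List Char) :
    pvOuter s s.length i out prot = pvGoB (s.drop i) 0 false buf out prot := by
  by_cases hi : i < s.length
  · by_cases hp : s.getD i ' ' = '('
    · rw [pvOuter]
      simp only [dif_pos hi, if_pos hp]
      rw [pv_drop_cons s i hi]
      simp only [pvGoB, if_pos hp, if_true]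
      rw [pv_inner_bridge s (i + 1) 1 _ out prot Nat.one_pos]
      have hge := pvInner_ge s s.length (i + 1) 1
      have h2 : (pvInner s s.length (i + 1) 1).1 - i
          = (pvInner s s.length (i + 1) 1).1 - (i + 1) + 1 := by omega
      rw [h2]
      by_cases hz : (pvInner s s.length (i + 1) 1).2 = 0
      · rw [if_pos hz]
        rw [pv_outer_bridge s (pvInner s s.length (i + 1) 1).1 _ _ []]
        simp
      · rw [if_neg hz]
        have hn := pvInner_exit s s.length (i + 1) 1 hz
        rw [pvOuter, dif_neg (by omega)]
        simp
    · rw [pvOuter]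
      simp only [dif_pos hi, if_neg hp]
      rw [pv_drop_cons s i hi]
      simp only [pvGoB, if_neg hp, if_true]
      rw [pv_outer_bridge s (i + 1) _ _ buf]
  · have hE : s.drop i = [] := List.drop_eq_nil_of_le (by omega)
    rw [hE, pvOuter, dif_neg hi]
    simp [pvGoB]
termination_by s.length + 1 - i
decreasing_by all_goals omega

-- ===== VERDICT (by name: the statement is the Claim_ definition above) =====
theorem protect_strings_py_spec : Claim_equal_protect_strings_py := by
  intro text _
  unfold Spec_protect_strings_py protect_strings_py protect_strings_py_alt
  simpa using pv_outer_bridge text.toList 0 [] [] []
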